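-- pv_equiv track=rewrite | github.com/TheTeaRex/adventofcode | day_06_tuning_trouble/code.py | solution
-- ===== SOURCE A (Python) =====
-- def solution(text, unique):
--     j = 0
--     buffer = set()
--     while j < len(text):
--         if text[j] in buffer:
--             buffer.clear()
--             buffer.add(text[j])
--             for k in range(j - 1, j - unique, -1):
--                 if text[k] == text[j]:
--                     break
--                 buffer.add(text[k])
--         else:
--             buffer.add(text[j])
--         j += 1
--         if len(buffer) == unique:
--             break
--
--     return j
-- ===== SOURCE B (Python) =====
-- def solution(text, unique):
--     last = {}
--     start = 0
--     for j, c in enumerate(text):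
--         p = last.get(c, -1)
--         if p >= start:
--             start = p + 1
--         last[c] = j
--         if j - start + 1 == unique:
--             return j + 1
--     return len(text)
-- ===== Notes on version B (the rewrite author's own statement) =====
-- stated objective: faster
-- what changed: Replaces A's incrementally-maintained set with backward rescans after each duplicate by a one-pass sliding window that keeps a last-seen-index map and jumps the window start past the previous occurrence, removing the inner backward scan.
import Mathlib
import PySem

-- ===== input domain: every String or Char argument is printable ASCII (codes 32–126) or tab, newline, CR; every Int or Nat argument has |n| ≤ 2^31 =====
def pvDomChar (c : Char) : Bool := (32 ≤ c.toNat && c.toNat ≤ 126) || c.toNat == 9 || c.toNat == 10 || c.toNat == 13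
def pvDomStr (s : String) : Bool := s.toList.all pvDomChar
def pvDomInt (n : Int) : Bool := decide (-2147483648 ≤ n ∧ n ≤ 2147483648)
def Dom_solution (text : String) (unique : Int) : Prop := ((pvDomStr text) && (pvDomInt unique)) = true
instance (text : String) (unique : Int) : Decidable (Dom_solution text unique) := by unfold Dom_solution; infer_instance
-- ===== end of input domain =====

-- B replaces A's backward rescans after each duplicate by a one-pass sliding window
-- with a last-seen-index map (objective: faster, O(n) instead of O(n*unique)).


-- ===== PORT A =====
-- inner 'for k in range(j-1, j-unique, -1)' with its break; 'none' marks Python's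
-- IndexError, which this loop never reaches (it breaks at the previous occurrence first)
-- iterates k = j-1, j-2, ... while k > stop, exactly like Python's lazy
-- range(j-1, j-unique, -1); 'none' marks Python's IndexError, which this loop
-- never reaches (it breaks at the previous occurrence first)
def walkA (cs : List Char) (c : Char) (k stop : Int) (buf : PySem.Set Char) : PySem.Set Char :=
  if _h : stop < k then
    match PySem.List.pyGet? cs k with
    | none => buf
    | some x => if x = c then buf else walkA cs c (k - 1) stop (PySem.Set.add buf x)
  else buf
termination_by (k - stop).toNat
decreasing_by omega

-- the 'while j < len(text)' loop of A; state = (j, buffer)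
def solGoA (cs : List Char) (unique : Int) (j : Nat) (buffer : PySem.Set Char) : Int :=
  if h : j < cs.length then
    let c := cs[j]
    let buffer' :=
      if PySem.Set.contains buffer c then
        walkA cs c ((j : Int) - 1) ((j : Int) - unique) (PySem.Set.add PySem.Set.empty c)
      else PySem.Set.add buffer c
    if (PySem.Set.len buffer' : Int) = unique then (j : Int) + 1
    else solGoA cs unique (j + 1) buffer'
  else (j : Int)
termination_by cs.length - j

def solution (text : String) (unique : Int) : Int :=
  solGoA text.toList unique 0 PySem.Set.empty

-- ===== PORT B =====
-- the 'for j, c in enumerate(text)' loop of B; state = (j, start, last)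
def solGoB (cs : List Char) (unique : Int) (j : Nat) (start : Int)
    (last : PySem.Dict Char Int) : Int :=
  if h : j < cs.length then
    let c := cs[j]
    let p := PySem.Dict.getD last c (-1)
    let start' := if start ≤ p then p + 1 else start
    let last' := PySem.Dict.insert last c (j : Int)
    if (j : Int) - start' + 1 = unique then (j : Int) + 1
    else solGoB cs unique (j + 1) start' last'
  else (cs.length : Int)
termination_by cs.length - j

def solution_alt (text : String) (unique : Int) : Int :=
  solGoB text.toList unique 0 0 PySem.Dict.empty

-- ===== PRECONDITION & SPEC =====
def Spec_solution (text : String) (unique : Int) (out : Int) : Prop := out = solution_alt text unique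
instance (text : String) (unique : Int) (out : Int) : Decidable (Spec_solution text unique out) := by unfold Spec_solution; infer_instance

-- ===== CLAIM (what is proved, stated in full; the proofs are below) =====
def Claim_equal_solution : Prop := ∀ (text : String) (unique : Int), Dom_solution text unique → Spec_solution text unique (solution text unique)

-- ===== LEMMAS AND PROOFS =====

-- last index < j holding character c, or -1 (what B's dict 'last' stores)
def lastOcc (cs : List Char) : Nat → Char → Int
  | 0, _ => -1
  | j + 1, c => if cs.getD j ' ' = c then (j : Int) else lastOcc cs j c

lemma lastOcc_lt (cs : List Char) (j : Nat) (c : Char) : lastOcc cs j c < (j : Int) := by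
  induction j with
  | zero => simp [lastOcc]
  | succ j ih =>
    simp only [lastOcc]
    split
    · omega
    · push_cast; omega

lemma le_lastOcc (cs : List Char) (c : Char) {j k : Nat} (hk : k < j)
    (he : cs.getD k ' ' = c) : (k : Int) ≤ lastOcc cs j c := by
  induction j with
  | zero => omega
  | succ j ih =>
    simp only [lastOcc]
    rcases Nat.lt_succ_iff_lt_or_eq.mp hk with h | rfl
    · split
      · have := lastOcc_lt cs j c; omega
      · exact ih h
    · rw [if_pos he]

lemma lastOcc_get (cs : List Char) (c : Char) {j : Nat} (h : 0 ≤ lastOcc cs j c) :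
    cs.getD (lastOcc cs j c).toNat ' ' = c ∧ (lastOcc cs j c).toNat < j := by
  induction j with
  | zero => simp [lastOcc] at h
  | succ j ih =>
    simp only [lastOcc] at *
    split at h <;> rename_i he
    · rw [if_pos he]
      simpa using he
    · rw [if_neg he]
      rcases ih h with ⟨h1, h2⟩
      exact ⟨h1, by omega⟩

lemma lastOcc_max (cs : List Char) (c : Char) {j k : Nat} (hk : k < j)
    (hgt : lastOcc cs j c < (k : Int)) : cs.getD k ' ' ≠ c := by
  intro he
  exact absurd (le_lastOcc cs c hk he) (by omega)

-- the backward walk from index pN+m down, stopping at pN (the previous occurrence),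
-- appends the characters cs[pN+1..pN+m] in decreasing index order
lemma walk_eq (cs : List Char) (c : Char) (pN : Nat) (hp : pN < cs.length)
    (hc : cs.getD pN ' ' = c) :
    ∀ (m : Nat) (lo : Int) (buf : PySem.Set Char),
      lo ≤ (pN : Int) → pN + m < cs.length →
      (∀ k : Nat, pN < k → k ≤ pN + m → cs.getD k ' ' ≠ c) →
      (∀ k : Nat, pN < k → k ≤ pN + m → cs.getD k ' ' ∉ buf) →
      (∀ k1 k2 : Nat, pN < k1 → k1 < k2 → k2 ≤ pN + m → cs.getD k1 ' ' ≠ cs.getD k2 ' ') →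
      walkA cs c ((pN + m : Nat) : Int) lo buf
        = buf ++ ((List.range' (pN + 1) m).map (fun k => cs.getD k ' ')).reverse := by
  intro m
  induction m with
  | zero =>
    intro lo buf hlo hlen hnc hnb hnd
    rcases lt_or_eq_of_le hlo with hlt | heq
    · simp only [Nat.add_zero] at hlt ⊢
      rw [walkA, dif_pos hlt]
      rw [PySem.List.pyGet?_ofNat cs pN hp]
      dsimp only
      have hc' : cs[pN] = c := by rw [← List.getD_eq_getElem cs ' ' hp]; exact hc
      rw [if_pos hc']
      simp
    · simp only [Nat.add_zero]
      rw [walkA, dif_neg (by omega)]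
      simp
  | succ m ih =>
    intro lo buf hlo hlen hnc hnb hnd
    have hlt : lo < ((pN + (m + 1) : Nat) : Int) := by push_cast; omega
    rw [walkA, dif_pos hlt]
    rw [PySem.List.pyGet?_ofNat cs (pN + (m + 1)) hlen]
    dsimp only
    have hx : cs[pN + (m + 1)] = cs.getD (pN + (m + 1)) ' ' :=
      (List.getD_eq_getElem cs ' ' hlen).symm
    have hne : ¬ cs[pN + (m + 1)] = c := by rw [hx]; exact hnc _ (by omega) le_rfl
    rw [if_neg hne]
    have hcast : ((pN + (m + 1) : Nat) : Int) - 1 = ((pN + m : Nat) : Int) := by push_cast; ring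
    rw [hcast]
    have hnotmem : cs[pN + (m + 1)] ∉ buf := by rw [hx]; exact hnb _ (by omega) le_rfl
    rw [PySem.Set.add_of_not_mem hnotmem]
    rw [ih lo (buf ++ [cs[pN + (m + 1)]]) hlo (by omega)
      (fun k h1 h2 => hnc k h1 (by omega))
      (by
        intro k hk1 hk2
        rw [List.mem_append]
        rw [not_or]
        refine ⟨hnb k hk1 (by omega), ?_⟩
        simp only [List.mem_singleton]
        rw [hx]
        exact hnd k (pN + (m + 1)) hk1 (by omega) le_rfl)
      (fun k1 k2 h1 h2 h3 => hnd k1 k2 h1 h2 (by omega))]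
    rw [List.range'_concat]
    simp only [List.map_append, List.reverse_append, List.map_cons, List.map_nil,
      List.reverse_cons, List.reverse_nil, List.nil_append, List.append_assoc,
      List.singleton_append]
    rw [hx]
    have : pN + 1 + 1 * m = pN + (m + 1) := by ring
    rw [this]

-- A's loop and B's loop agree, coupled by the invariant:
-- buffer = the distinct characters of the window cs[s..j-1], last = last-seen map
lemma couple (cs : List Char) (unique : Int) (_hu : 1 ≤ unique) :
    ∀ (fuel j s : Nat) (buffer : PySem.Set Char) (last : PySem.Dict Char Int),
      cs.length - j ≤ fuel → s ≤ j → j ≤ cs.length →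
      (∀ x, x ∈ buffer ↔ ∃ k : Nat, s ≤ k ∧ k < j ∧ cs.getD k ' ' = x) →
      (∀ k1 k2 : Nat, s ≤ k1 → k1 < k2 → k2 < j → cs.getD k1 ' ' ≠ cs.getD k2 ' ') →
      PySem.Set.len buffer = j - s →
      ((j : Int) - s < unique) →
      (∀ x, PySem.Dict.getD last x (-1) = lastOcc cs j x) →
      solGoA cs unique j buffer = solGoB cs unique j (s : Int) last := by
  intro fuel
  induction fuel with
  | zero =>
    intro j s buffer last hfuel hsj hjl _ _ _ _ _
    rw [solGoA, solGoB, dif_neg (by omega), dif_neg (by omega)]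
    congr 1
    omega
  | succ fuel ih =>
    intro j s buffer last hfuel hsj hjl hbuf hnd hlen hsize hlast
    by_cases h : j < cs.length
    · rw [solGoA, solGoB, dif_pos h, dif_pos h]
      dsimp only
      have hcj : cs[j] = cs.getD j ' ' := (List.getD_eq_getElem cs ' ' h).symm
      rw [hlast cs[j]]
      by_cases hmem : cs[j] ∈ buffer
      · -- duplicate: rebuild the buffer / jump the window start
        rw [if_pos ((PySem.Set.contains_iff buffer cs[j]).mpr hmem)]
        obtain ⟨k0, hk0s, hk0j, hk0e⟩ := (hbuf cs[j]).mp hmem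
        have hk0p : (k0 : Int) ≤ lastOcc cs j cs[j] := le_lastOcc cs cs[j] hk0j hk0e
        have hp0 : 0 ≤ lastOcc cs j cs[j] := by omega
        obtain ⟨hpc, hpj⟩ := lastOcc_get cs cs[j] hp0
        set pN : Nat := (lastOcc cs j cs[j]).toNat with hpNdef
        have hpcast : (pN : Int) = lastOcc cs j cs[j] := Int.toNat_of_nonneg hp0
        have hspN : s ≤ pN := by omega
        have hsp : (s : Int) ≤ lastOcc cs j cs[j] := by omega
        rw [if_pos hsp]
        -- rewrite the walk using walk_eq with m = j - 1 - pN
        have hm : (j : Int) - 1 = ((pN + (j - 1 - pN) : Nat) : Int) := by push_cast; omega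
        rw [hm]
        have hinit : PySem.Set.add PySem.Set.empty cs[j] = [cs[j]] :=
          PySem.Set.add_of_not_mem (by simp [PySem.Set.empty])
        rw [hinit]
        rw [walk_eq cs cs[j] pN (by omega) hpc (j - 1 - pN) ((j : Int) - unique)
          [cs[j]]
          (by omega) (by omega)
          (by
            intro k h1 h2
            apply lastOcc_max cs cs[j] (j := j) (k := k) (by omega)
            omega)
          (by
            intro k h1 h2
            have hne : cs.getD k ' ' ≠ cs[j] := by
              apply lastOcc_max cs cs[j] (j := j) (k := k) (by omega)
              omega
            simp only [List.mem_singleton]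
            exact hne)
          (by
            intro k1 k2 h1 h2 h3
            exact hnd k1 k2 (by omega) h2 (by omega))]
        -- both break conditions say  j - lastOcc = unique
        have hlen' : PySem.Set.len ([cs[j]] ++
            ((List.range' (pN + 1) (j - 1 - pN)).map (fun k => cs.getD k ' ')).reverse)
            = (j : Int) - pN := by
          simp only [PySem.Set.len, List.length_append, List.length_reverse,
            List.length_map, List.length_range', List.length_singleton]
          push_cast
          omega
        rw [hlen']
        by_cases hbrk : (j : Int) - pN = unique
        · rw [if_pos hbrk, if_pos (by omega)]
        · rw [if_neg hbrk, if_neg (by omega)]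
          have hstart : lastOcc cs j cs[j] + 1 = ((pN + 1 : Nat) : Int) := by push_cast; omega
          rw [hstart]
          refine ih (j + 1) (pN + 1) _ _ (by omega) (by omega) (by omega) ?_ ?_ ?_ (by push_cast; omega) ?_
          · -- membership invariant
            intro x
            simp only [List.singleton_append, List.mem_cons, List.mem_reverse,
              List.mem_map, List.mem_range'_1]
            constructor
            · rintro (rfl | ⟨k, ⟨hk1, hk2⟩, rfl⟩)
              · exact ⟨j, by omega, by omega, hcj.symm⟩
              · exact ⟨k, by omega, by omega, rfl⟩
            · rintro ⟨k, hk1, hk2, rfl⟩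
              by_cases hkj : k = j
              · exact Or.inl (by rw [hkj]; exact hcj.symm)
              · exact Or.inr ⟨k, ⟨by omega, by omega⟩, rfl⟩
          · -- distinctness invariant
            intro k1 k2 h1 h2 h3
            by_cases hk2j : k2 = j
            · rw [hk2j, ← hcj]
              exact lastOcc_max cs cs[j] (j := j) (k := k1) (by omega) (by omega)
            · exact hnd k1 k2 (by omega) h2 (by omega)
          · -- length invariant
            simp only [PySem.Set.len, List.length_append, List.length_reverse,
              List.length_map, List.length_range', List.length_singleton]
            omega
          · -- last-seen invariant
            intro x
            rw [PySem.Dict.getD_insert]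
            have : lastOcc cs (j + 1) x
                = if cs.getD j ' ' = x then (j : Int) else lastOcc cs j x := rfl
            rw [this, ← hcj, hlast x]
            by_cases hxc : x = cs[j]
            · rw [if_pos hxc, if_pos hxc.symm]
            · rw [if_neg hxc, if_neg (fun hh => hxc hh.symm)]
      · -- fresh character: append to the buffer / keep the window start
        rw [if_neg (show ¬ PySem.Set.contains buffer cs[j] = true from
          fun hh => hmem ((PySem.Set.contains_iff buffer cs[j]).mp hh))]
        have hps : lastOcc cs j cs[j] < (s : Int) := by
          by_contra hge
          rw [not_lt] at hge
          have hp0 : 0 ≤ lastOcc cs j cs[j] := by omega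
          obtain ⟨hpc, hpj⟩ := lastOcc_get cs cs[j] hp0
          exact hmem ((hbuf cs[j]).mpr ⟨(lastOcc cs j cs[j]).toNat, by omega, hpj, hpc⟩)
        rw [if_neg (show ¬ (s : Int) ≤ lastOcc cs j cs[j] from by omega)]
        rw [PySem.Set.add_of_not_mem hmem]
        have hlen' : PySem.Set.len (buffer ++ [cs[j]]) = (j : Int) - s + 1 := by
          simp only [PySem.Set.len, List.length_append, List.length_singleton] at hlen ⊢
          push_cast at hlen ⊢
          omega
        rw [hlen']
        by_cases hbrk : (j : Int) - s + 1 = unique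
        · rw [if_pos hbrk, if_pos hbrk]
        · rw [if_neg hbrk, if_neg hbrk]
          refine ih (j + 1) s _ _ (by omega) (by omega) (by omega) ?_ ?_ ?_ (by push_cast; omega) ?_
          · intro x
            simp only [List.mem_append, List.mem_singleton]
            constructor
            · rintro (hx | rfl)
              · obtain ⟨k, a1, a2, a3⟩ := (hbuf x).mp hx
                exact ⟨k, a1, by omega, a3⟩
              · exact ⟨j, by omega, by omega, hcj.symm⟩
            · rintro ⟨k, hk1, hk2, rfl⟩
              by_cases hkj : k = j
              · exact Or.inr (by rw [hkj]; exact hcj.symm)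
              · exact Or.inl ((hbuf _).mpr ⟨k, hk1, by omega, rfl⟩)
          · intro k1 k2 h1 h2 h3
            by_cases hk2j : k2 = j
            · rw [hk2j, ← hcj]
              intro he
              exact hmem ((hbuf cs[j]).mpr ⟨k1, h1, by omega, he⟩)
            · exact hnd k1 k2 h1 h2 (by omega)
          · simp only [PySem.Set.len, List.length_append, List.length_singleton] at hlen ⊢
            push_cast at hlen ⊢
            omega
          · intro x
            rw [PySem.Dict.getD_insert]
            have : lastOcc cs (j + 1) x
                = if cs.getD j ' ' = x then (j : Int) else lastOcc cs j x := rfl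
            rw [this, ← hcj, hlast x]
            by_cases hxc : x = cs[j]
            · rw [if_pos hxc, if_pos hxc.symm]
            · rw [if_neg hxc, if_neg (fun hh => hxc hh.symm)]
    · rw [solGoA, solGoB, dif_neg h, dif_neg h]
      congr 1
      omega

-- the walk only ever adds elements
lemma walkA_mem_mono (cs : List Char) (c : Char) (k stop : Int) (buf : PySem.Set Char) :
    ∀ x, x ∈ buf → x ∈ walkA cs c k stop buf := by
  fun_induction walkA cs c k stop buf with
  | case1 => intro x hx; exact hx
  | case2 => intro x hx; exact hx
  | case3 k stop buf _ y _ ih =>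
    intro x hx
    exact ih x ((PySem.Set.mem_add _ _ _).mpr (Or.inl hx))
  | case4 => intro x hx; exact hx

lemma lenA (cs : List Char) (unique : Int) (hu : unique ≤ 0) :
    ∀ (fuel j : Nat) (buffer : PySem.Set Char), cs.length - j ≤ fuel → j ≤ cs.length →
      solGoA cs unique j buffer = (cs.length : Int) := by
  intro fuel
  induction fuel with
  | zero =>
    intro j buffer h1 h2
    rw [solGoA, dif_neg (by omega)]
    congr 1
    omega
  | succ fuel ih =>
    intro j buffer h1 h2
    rw [solGoA]
    by_cases h : j < cs.length
    · rw [dif_pos h]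
      dsimp only
      have key : ∀ b' : PySem.Set Char, cs[j] ∈ b' →
          (if PySem.Set.len b' = unique then (j : Int) + 1
           else solGoA cs unique (j + 1) b') = (cs.length : Int) := by
        intro b' hb
        have hpos : 0 < b'.length := List.length_pos_of_mem hb
        rw [if_neg (by simp only [PySem.Set.len]; omega)]
        exact ih (j + 1) b' (by omega) (by omega)
      by_cases hm : PySem.Set.contains buffer cs[j] = true
      · rw [if_pos hm]
        exact key _ (walkA_mem_mono cs cs[j] _ _ _ _
          ((PySem.Set.mem_add _ _ _).mpr (Or.inr rfl)))
      · rw [if_neg hm]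
        exact key _ ((PySem.Set.mem_add _ _ _).mpr (Or.inr rfl))
    · rw [dif_neg h]
      congr 1
      omega

lemma lenB (cs : List Char) (unique : Int) (hu : unique ≤ 0) :
    ∀ (fuel j : Nat) (start : Int) (last : PySem.Dict Char Int),
      cs.length - j ≤ fuel → j ≤ cs.length → 0 ≤ start → start ≤ (j : Int) →
      (∀ x, PySem.Dict.getD last x (-1) < (j : Int)) →
      solGoB cs unique j start last = (cs.length : Int) := by
  intro fuel
  induction fuel with
  | zero =>
    intro j start last h1 h2 _ _ _
    rw [solGoB, dif_neg (by omega)]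
  | succ fuel ih =>
    intro j start last h1 h2 h3 h4 h5
    rw [solGoB]
    by_cases h : j < cs.length
    · rw [dif_pos h]
      dsimp only
      have hp := h5 cs[j]
      by_cases hsp : start ≤ PySem.Dict.getD last cs[j] (-1)
      · rw [if_pos hsp, if_neg (by omega)]
        refine ih (j + 1) _ _ (by omega) (by omega) (by omega) (by omega) ?_
        intro x
        rw [PySem.Dict.getD_insert]
        split
        · push_cast; omega
        · have := h5 x; omega
      · rw [if_neg hsp, if_neg (by omega)]
        refine ih (j + 1) _ _ (by omega) (by omega) (by omega) (by omega) ?_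
        intro x
        rw [PySem.Dict.getD_insert]
        split
        · push_cast; omega
        · have := h5 x; omega
    · rw [dif_neg h]

-- ===== VERDICT (by name: the statement is the Claim_ definition above) =====
theorem solution_spec : Claim_equal_solution := by
  intro text unique _
  unfold Spec_solution solution solution_alt
  by_cases hu : unique ≤ 0
  · rw [lenA text.toList unique hu text.toList.length 0 PySem.Set.empty (by omega) (by omega),
      lenB text.toList unique hu text.toList.length 0 0 PySem.Dict.empty (by omega) (by omega)
        le_rfl le_rfl (by intro x; simp [PySem.Dict.getD_empty])]
  · exact couple text.toList unique (by omega) text.toList.length 0 0 PySem.Set.empty PySem.Dict.empty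
      (by omega) (by omega) (by omega)
      (by intro x; simp [PySem.Set.empty])
      (by intro k1 k2 h1 h2 h3; omega)
      (by simp [PySem.Set.len, PySem.Set.empty])
      (by omega)
      (by intro x; simp [PySem.Dict.getD_empty, lastOcc])
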